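-- pv_equiv track=rewrite | github.com/fran-cab/codility_solutions | L06-Sorting/triangle.py | solution
-- ===== SOURCE A (Python) =====
-- def solution(a: list) -> int:
--     """
--     >>> solution([])
--     0
--     >>> solution([10, 2, 5, 1, 8, 20])
--     1
--     >>> solution([10, 50, 5, 1])
--     0
--     """
--     if len(a) < 3:
--         return 0
--     a = sorted(a, reverse=True)
--     for i in range(len(a) - 2):
--         if a[i] + a[i + 1] > a[i + 2] and \
--            a[i] + a[i + 2] > a[i + 1] and \
--            a[i + 1] + a[i + 2] > a[i]:
--             return 1
--     return 0
-- ===== SOURCE B (Python) =====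
-- def solution(a: list) -> int:
--     """Brute force: test every triple of distinct positions directly (no sorting)."""
--     s = a
--     while s:
--         x, t = s[0], s[1:]
--         u = t
--         while u:
--             y, r = u[0], u[1:]
--             for z in r:
--                 if x + y > z and x + z > y and y + z > x:
--                     return 1
--             u = r
--         s = t
--     return 0
-- ===== Notes on version B (the rewrite author's own statement) =====
-- stated objective: alternative
-- what changed: Replaced sort-descending-then-scan-consecutive-triples with a direct brute-force search over all triples of distinct positions, correct by the lemma that a triangle exists iff three consecutive sorted elements form one.
import Mathlib
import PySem

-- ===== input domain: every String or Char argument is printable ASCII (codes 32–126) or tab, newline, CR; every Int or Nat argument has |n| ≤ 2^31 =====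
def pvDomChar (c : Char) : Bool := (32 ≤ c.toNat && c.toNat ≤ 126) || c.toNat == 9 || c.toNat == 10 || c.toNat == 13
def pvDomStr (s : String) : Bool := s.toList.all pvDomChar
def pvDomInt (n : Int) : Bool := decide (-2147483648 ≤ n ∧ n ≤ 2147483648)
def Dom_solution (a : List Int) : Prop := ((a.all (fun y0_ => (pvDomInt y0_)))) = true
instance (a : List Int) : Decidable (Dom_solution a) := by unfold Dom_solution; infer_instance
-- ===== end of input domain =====

-- B replaces A's sort-then-consecutive-scan by a brute-force search over all
-- triples of distinct positions (alternative decomposition, no sorting).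

-- ===== PORT A =====
-- the for-loop over i with a[i], a[i+1], a[i+2]: structural scan of consecutive triples
def pvScanA : List Int → Int
  | x :: y :: z :: rest =>
      if x + y > z ∧ x + z > y ∧ y + z > x then 1 else pvScanA (y :: z :: rest)
  | _ => 0

def solution (a : List Int) : Int :=
  if PySem.List.len a < 3 then 0
  else pvScanA (PySem.List.sorted a (fun x => x) true)

-- ===== PORT B =====
def pvTri (x y z : Int) : Bool :=
  decide (x + y > z) && decide (x + z > y) && decide (y + z > x)

-- inner two loops of Source B: y runs over suffixes u of t, z over the rest after y
def pvPick2 (x : Int) : List Int → Bool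
  | [] => false
  | y :: r => r.any (fun z => pvTri x y z) || pvPick2 x r

-- outer loop of Source B: x runs over suffixes s of a
def pvCore : List Int → Bool
  | [] => false
  | x :: t => pvPick2 x t || pvCore t

def solution_alt (a : List Int) : Int := if pvCore a then 1 else 0

-- ===== PRECONDITION & SPEC =====
def Spec_solution (a : List Int) (out : Int) : Prop := out = solution_alt a
instance (a : List Int) (out : Int) : Decidable (Spec_solution a out) := by unfold Spec_solution; infer_instance

-- ===== CLAIM (what is proved, stated in full; the proofs are below) =====
def Claim_equal_solution : Prop := ∀ (a : List Int), Dom_solution a → Spec_solution a (solution a)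

-- ===== LEMMAS AND PROOFS =====

-- the triangle predicate, Prop level
def Tri (x y z : Int) : Prop := x + y > z ∧ x + z > y ∧ y + z > x

-- "some triple of distinct positions forms a triangle"
def TriP (l : List Int) : Prop := ∃ x y z, [x, y, z].Sublist l ∧ Tri x y z

lemma pvTri_iff (x y z : Int) : pvTri x y z = true ↔ Tri x y z := by
  simp [pvTri, Tri, and_assoc]

lemma pvPick2_iff (x : Int) (l : List Int) :
    pvPick2 x l = true ↔ ∃ y z, [y, z].Sublist l ∧ Tri x y z := by
  induction l with
  | nil => simp [pvPick2]
  | cons y r ih =>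
    simp only [pvPick2, Bool.or_eq_true, List.any_eq_true, pvTri_iff, ih]
    constructor
    · rintro (⟨z, hz, ht⟩ | ⟨y', z', hs, ht⟩)
      · exact ⟨y, z, (List.singleton_sublist.mpr hz).cons₂ y, ht⟩
      · exact ⟨y', z', hs.cons y, ht⟩
    · rintro ⟨y', z', hs, ht⟩
      cases hs with
      | cons _ h => exact Or.inr ⟨y', z', h, ht⟩
      | cons₂ _ h => exact Or.inl ⟨z', List.singleton_sublist.mp h, ht⟩

lemma pvCore_iff (l : List Int) : pvCore l = true ↔ TriP l := by
  induction l with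
  | nil => simp [pvCore, TriP]
  | cons x t ih =>
    simp only [pvCore, Bool.or_eq_true, pvPick2_iff, ih, TriP]
    constructor
    · rintro (⟨y, z, hs, ht⟩ | ⟨x', y', z', hs, ht⟩)
      · exact ⟨x, y, z, hs.cons₂ x, ht⟩
      · exact ⟨x', y', z', hs.cons x, ht⟩
    · rintro ⟨x', y', z', hs, ht⟩
      cases hs with
      | cons _ h => exact Or.inr ⟨x', y', z', h, ht⟩
      | cons₂ _ h => exact Or.inl ⟨y', z', h, ht⟩

-- Tri is determined by the three memberships and the sum: each element < sum of the others
lemma tri_sum (x y z : Int) : Tri x y z ↔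
    2 * x < x + y + z ∧ 2 * y < x + y + z ∧ 2 * z < x + y + z := by
  unfold Tri; omega

lemma triP_of_perm {l l' : List Int} (hp : l.Perm l') (h : TriP l) : TriP l' := by
  obtain ⟨x, y, z, hs, ht⟩ := h
  obtain ⟨u, hup, hus⟩ := hs.subperm.trans hp.subperm
  have hlen : u.length = 3 := by simpa using hup.length_eq
  obtain ⟨a, b, c, rfl⟩ := List.length_eq_three.mp hlen
  have hsum : a + (b + c) = x + (y + z) := by simpa using hup.sum_eq
  have ha : a = x ∨ a = y ∨ a = z := by simpa using hup.subset (by simp)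
  have hb : b = x ∨ b = y ∨ b = z := by simpa using hup.subset (by simp : b ∈ [a,b,c])
  have hc : c = x ∨ c = y ∨ c = z := by simpa using hup.subset (by simp : c ∈ [a,b,c])
  refine ⟨a, b, c, hus, ?_⟩
  rw [tri_sum] at ht ⊢
  rcases ha with rfl | rfl | rfl <;> rcases hb with rfl | rfl | rfl <;>
    rcases hc with rfl | rfl | rfl <;> omega

lemma pvScanA_zero_or_one (l : List Int) : pvScanA l = 0 ∨ pvScanA l = 1 := by
  induction l with
  | nil => left; rfl
  | cons x t ih =>
    match t, ih with
    | [], _ => left; rfl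
    | [y], _ => left; rfl
    | y :: z :: rest, ih =>
      by_cases h : x + y > z ∧ x + z > y ∧ y + z > x
      · right; simp [pvScanA, h]
      · simpa [pvScanA, h] using ih

lemma triP_of_pvScanA {l : List Int} (h : pvScanA l = 1) : TriP l := by
  induction l with
  | nil => simp [pvScanA] at h
  | cons x t ih =>
    match t, ih with
    | [], _ => simp [pvScanA] at h
    | [y], _ => simp [pvScanA] at h
    | y :: z :: rest, ih =>
      by_cases hc : x + y > z ∧ x + z > y ∧ y + z > x
      · exact ⟨x, y, z, ((List.nil_sublist rest).cons₂ z).cons₂ y |>.cons₂ x, hc⟩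
      · rw [pvScanA, if_neg hc] at h
        obtain ⟨a, b, c, hs, ht⟩ := ih h
        exact ⟨a, b, c, hs.cons x, ht⟩

-- on a descending-sorted list, any triangle forces a consecutive one (the key lemma)
lemma pvScanA_of_triP {l : List Int} (hp : l.Pairwise (fun a b => b ≤ a))
    (h : TriP l) : pvScanA l = 1 := by
  induction l with
  | nil => obtain ⟨x, y, z, hs, _⟩ := h; simp at hs
  | cons p t ih =>
    obtain ⟨hp1, hp2⟩ := List.pairwise_cons.mp hp
    obtain ⟨x, y, z, hs, ht⟩ := h
    cases hs with
    | cons _ hsub =>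
      -- the whole triple lies in t: recurse, then prepend p
      have h1 : pvScanA t = 1 := ih hp2 ⟨x, y, z, hsub, ht⟩
      match t, h1 with
      | h1' :: h2' :: h3' :: r, h1 =>
        by_cases hc : p + h1' > h2' ∧ p + h2' > h1' ∧ h1' + h2' > p
        · simp [pvScanA, hc]
        · rw [pvScanA, if_neg hc]; exact h1
    | cons₂ _ hsub =>
      -- x = p, [y, z] <+ t: the first consecutive triple already works
      have hyz : y ∈ t ∧ z ≤ y := by
        refine ⟨hsub.subset (by simp), ?_⟩
        have := List.Pairwise.sublist hsub hp2
        simpa using this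
      match t, hsub, hp2, hyz with
      | h1' :: h2' :: r, hsub, hp2, hyz =>
        obtain ⟨hph1, hph2r⟩ := List.pairwise_cons.mp hp2
        obtain ⟨hh2, _⟩ := List.pairwise_cons.mp hph2r
        -- bounds: y ≤ h1', z ≤ h2'
        have hy1 : y ≤ h1' := by
          rcases List.mem_cons.mp hyz.1 with h | h
          · omega
          · exact hph1 y h
        have hz2 : z ≤ h2' := by
          cases hsub with
          | cons _ h2 =>
            have hzmem : z ∈ h2' :: r := h2.subset (by simp)
            rcases List.mem_cons.mp hzmem with h | h
            · omega
            · exact hh2 z h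
          | cons₂ _ h2 =>
            have hzmem : z ∈ h2' :: r := List.singleton_sublist.mp h2
            rcases List.mem_cons.mp hzmem with h | h
            · omega
            · exact hh2 z h
        have hph1' : h1' ≤ p := hp1 h1' (by simp)
        have hph2' : h2' ≤ p := hp1 h2' (by simp)
        have hh21 : h2' ≤ h1' := hph1 h2' (by simp)
        obtain ⟨t1, t2, t3⟩ := ht
        have hcond : p + h1' > h2' ∧ p + h2' > h1' ∧ h1' + h2' > p := by omega
        simp [pvScanA, hcond]

-- ===== VERDICT (by name: the statement is the Claim_ definition above) =====
theorem solution_spec : Claim_equal_solution := by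
  intro a _
  unfold Spec_solution solution solution_alt
  by_cases hlen : PySem.List.len a < 3
  · rw [if_pos hlen]
    have hlen' : a.length < 3 := by simpa [PySem.List.len_eq] using hlen
    have : pvCore a = false := by
      rw [Bool.eq_false_iff]
      intro hc
      obtain ⟨x, y, z, hs, _⟩ := (pvCore_iff a).mp hc
      have := hs.length_le
      simp at this; omega
    simp [this]
  · rw [if_neg hlen]
    have hperm : (PySem.List.sorted a (fun x => x) true).Perm a :=
      PySem.List.sorted_perm a (fun x => x) true
    have hpw : (PySem.List.sorted a (fun x => x) true).Pairwise (fun u v => v ≤ u) :=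
      PySem.List.sorted_pairwise_rev a (fun x => x)
    by_cases hc : pvCore a = true
    · have hT : TriP (PySem.List.sorted a (fun x => x) true) :=
        triP_of_perm hperm.symm ((pvCore_iff a).mp hc)
      rw [pvScanA_of_triP hpw hT, hc, if_pos rfl]
    · have hF : pvCore a = false := Bool.eq_false_iff.mpr hc
      rcases pvScanA_zero_or_one (PySem.List.sorted a (fun x => x) true) with h0 | h1
      · rw [h0, hF]; simp
      · exact absurd ((pvCore_iff a).mpr (triP_of_perm hperm (triP_of_pvScanA h1))) hc
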